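-- pv_equiv track=rewrite | github.com/reprograma/on34-python-s04-logica-III | stephanie-cirne-s04/descobre_texto.py | identifica
-- ===== SOURCE A (Python) =====
-- def contador (texto):
--         texto_extraido = texto.split()
--         contagem = 0
--         for palavra_encontrada in texto_extraido:
--             if palavra_encontrada == "lei":
--                 contagem +=1
--
--         return contagem
--
-- def identifica (textos):
--     resultado = []
--     for texto in textos:
--         quantidade = contador (texto)
--         resultado.append (quantidade)
--
-- #Na função "enumerate" retorna a posição e o valor da lista dentro de resultado e percorra dentro dele. Enumerate retorna a posição e o valor. O segundo if vai checar qual é o maior da lista e identificar a sua posição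
--
--     for posicao, valor in enumerate (resultado):
--         if posicao == 0:
--             maior_valor = valor
--             posicao_maior_valor = posicao +1
--
--         if valor > maior_valor:
--             maior_valor = valor
--             posicao_maior_valor = posicao +1
--
--     return posicao_maior_valor
-- ===== SOURCE B (Python) =====
-- def identifica(textos):
--     # single pass, no intermediate list; count via list.count; sentinel -1 so the
--     # first element always wins the first comparison (first max kept, as in A)
--     maior = -1
--     posicao = 0
--     for i, texto in enumerate(textos):
--         quantidade = texto.split().count("lei")
--         if quantidade > maior:
--             maior = quantidade
--             posicao = i + 1
--     return posicao
-- ===== Notes on version B (the rewrite author's own statement) =====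
-- stated objective: simpler
-- what changed: B fuses A's two passes into one loop over enumerate(textos), counting 'lei' with split().count and tracking the running max with a -1 sentinel instead of building an intermediate count list and re-scanning it with a posicao==0 initialisation branch.
import Mathlib
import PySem

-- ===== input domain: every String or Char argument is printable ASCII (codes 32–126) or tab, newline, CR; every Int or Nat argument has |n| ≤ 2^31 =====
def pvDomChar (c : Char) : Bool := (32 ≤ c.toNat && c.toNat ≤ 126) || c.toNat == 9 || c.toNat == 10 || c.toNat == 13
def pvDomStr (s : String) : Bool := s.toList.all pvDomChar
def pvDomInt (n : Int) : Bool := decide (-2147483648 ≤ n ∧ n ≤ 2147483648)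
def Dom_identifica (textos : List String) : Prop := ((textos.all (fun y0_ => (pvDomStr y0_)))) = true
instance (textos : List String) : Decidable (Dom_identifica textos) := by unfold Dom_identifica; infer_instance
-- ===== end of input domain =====

-- B fuses A's two passes into a single loop (no intermediate count list, -1 sentinel
-- instead of the posicao==0 initialisation branch); equivalence on nonempty input.

-- ===== PORT A =====
def contador (texto : String) : Int :=
  let texto_extraido := PySem.Str.split₀ texto
  texto_extraido.foldl
    (fun contagem palavra_encontrada =>
      if palavra_encontrada == "lei" then contagem + 1 else contagem) 0

def identifica (textos : List String) : Int :=
  let resultado : List Int := textos.foldl (fun acc texto => acc ++ [contador texto]) []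
  -- second loop; the unbound variables become an Option state (none = unbound,
  -- only reachable when textos = [], excluded by Pre_)
  let st := (PySem.List.enumerate resultado).foldl
    (fun (st : Option (Int × Int)) (pv : Int × Int) =>
      let st1 := if pv.1 == 0 then some (pv.2, pv.1 + 1) else st
      match st1 with
      | some (maior, pm) => if pv.2 > maior then some (pv.2, pv.1 + 1) else some (maior, pm)
      | none => none) none
  match st with
  | some (_, pm) => pm
  | none => 0

-- ===== PORT B =====
def identifica_alt (textos : List String) : Int :=
  ((PySem.List.enumerate textos).foldl
    (fun (st : Int × Int) (p : Int × String) =>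
      let quantidade : Int := (((PySem.Str.split₀ p.2).count "lei" : Nat) : Int)
      if quantidade > st.1 then (quantidade, p.1 + 1) else st) (-1, 0)).2

-- ===== PRECONDITION & SPEC =====
-- Pre_ excludes only the empty list, on which A raises UnboundLocalError (B would return 0 there).
def Pre_identifica (textos : List String) : Prop := textos ≠ []
instance (textos : List String) : Decidable (Pre_identifica textos) := by unfold Pre_identifica; infer_instance
def pvWitness_identifica : List String := (["a lei", "lei lei"])

def Spec_identifica (textos : List String) (out : Int) : Prop := out = identifica_alt textos
instance (textos : List String) (out : Int) : Decidable (Spec_identifica textos out) := by unfold Spec_identifica; infer_instance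

-- ===== CLAIM (what is proved, stated in full; the proofs are below) =====
def Claim_equal_identifica : Prop := ∀ (textos : List String), Dom_identifica textos → Pre_identifica textos → Spec_identifica textos (identifica textos)

-- ===== LEMMAS AND PROOFS =====

-- A's hand-written counting loop is List.count of the split words
theorem contador_eq (t : String) :
    contador t = (((PySem.Str.split₀ t).count "lei" : Nat) : Int) := by
  rw [contador, PySem.List.foldl_count_if (· == "lei")]
  simp [List.count_eq_countP]

-- fused loop over the tail (indices ≥ 1, so A's `posicao == 0` branch never fires);
-- stated in the simp-normal form of the two loop bodies
theorem loop_eq (ts : List String) : ∀ (k m p : Int), 1 ≤ k →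
    List.foldl
      (fun (st : Option (Int × Int)) (pv : Int × Int) =>
        match if pv.1 = 0 then some (pv.2, pv.1 + 1) else st with
        | some (maior, pm) => if maior < pv.2 then some (pv.2, pv.1 + 1) else some (maior, pm)
        | none => none) (some (m, p)) (PySem.List.enumerate (ts.map contador) k) =
    some (List.foldl
      (fun (st : Int × Int) (q : Int × String) =>
        if st.1 < (((PySem.Str.split₀ q.2).count "lei" : Nat) : Int) then
          ((((PySem.Str.split₀ q.2).count "lei" : Nat) : Int), q.1 + 1)
        else st) (m, p) (PySem.List.enumerate ts k)) := by
  induction ts with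
  | nil => intro k m p hk; simp [PySem.List.enumerate_nil]
  | cons t ts ih =>
    intro k m p hk
    simp only [List.map_cons, PySem.List.enumerate_cons, List.foldl_cons,
      if_neg (by omega : ¬ k = 0), contador_eq t]
    by_cases h : m < (((PySem.Str.split₀ t).count "lei" : Nat) : Int)
    · simp only [if_pos h]; exact ih (k + 1) _ _ (by omega)
    · simp only [if_neg h]; exact ih (k + 1) m p (by omega)

-- ===== VERDICT (by name: the statement is the Claim_ definition above) =====
theorem identifica_spec : Claim_equal_identifica := by
  intro textos _ hpre
  unfold Spec_identifica identifica identifica_alt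
  match textos with
  | [] => exact absurd rfl hpre
  | t :: ts =>
    have h0 : (-1 : Int) < (((PySem.Str.split₀ t).count "lei" : Nat) : Int) := by
      have := Int.natCast_nonneg ((PySem.Str.split₀ t).count "lei"); omega
    simp only [PySem.List.foldl_append_singleton_eq_map,
      PySem.List.enumerate_cons, List.foldl_cons, contador_eq t]
    norm_num [h0]
    rw [loop_eq ts 1 _ _ (by omega)]
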